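-- pv_equiv track=rewrite | github.com/CCimen/eneoplugin | plugins/eneo-standards/hooks/lib/env.py | _preferred_eneo_container
-- ===== SOURCE A (Python) =====
-- def _is_eneo_candidate(name: str) -> bool:
--     lowered = name.lower()
--     if "eneo" not in lowered:
--         return False
--     return not any(part in lowered for part in ("db", "redis", "celery", "worker", "flow"))
--
-- def _preferred_eneo_container(names: list[str]) -> str | None:
--     preferred_tokens = ("devcontainer", "backend", "app", "web", "api")
--     for name in names:
--         lowered = name.lower()
--         if any(token in lowered for token in preferred_tokens) or lowered.endswith("eneo-1"):
--             return name
--     for name in names: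
--         if _is_eneo_candidate(name):
--             return name
--     return None
-- ===== SOURCE B (Python) =====
-- def _preferred_eneo_container(names: list[str]) -> str | None:
--     PREFERRED = ("devcontainer", "backend", "app", "web", "api")
--     BAD = ("db", "redis", "celery", "worker", "flow")
--     fallback = None
--     for name in names:
--         lowered = name.lower()
--         if any(tok in lowered for tok in PREFERRED) or lowered.endswith("eneo-1"):
--             return name
--         if fallback is None and "eneo" in lowered and not any(b in lowered for b in BAD):
--             fallback = name
--     return fallback
-- ===== Notes on version B (the rewrite author's own statement) =====
-- stated objective: simpler
-- what changed: The two sequential scans (preferred names, then eneo candidates) are collapsed into one pass that returns preferred names immediately and keeps the first candidate in a fallback variable.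
import Mathlib
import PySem

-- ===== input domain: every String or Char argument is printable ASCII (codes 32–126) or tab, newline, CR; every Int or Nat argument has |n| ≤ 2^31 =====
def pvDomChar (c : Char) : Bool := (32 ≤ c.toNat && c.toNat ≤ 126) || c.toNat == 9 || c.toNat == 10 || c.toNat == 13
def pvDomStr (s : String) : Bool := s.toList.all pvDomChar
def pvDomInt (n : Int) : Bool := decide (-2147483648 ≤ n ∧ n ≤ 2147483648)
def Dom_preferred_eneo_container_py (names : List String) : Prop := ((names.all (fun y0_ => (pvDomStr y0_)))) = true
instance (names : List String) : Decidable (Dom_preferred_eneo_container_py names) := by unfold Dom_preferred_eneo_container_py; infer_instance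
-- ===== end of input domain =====

-- B collapses A's two sequential scans into a single pass carrying a first-candidate fallback accumulator (same cost, one traversal).


-- ===== PORT A =====
def pv_is_eneo_candidate (name : String) : Bool :=
  let lowered := PySem.Str.lower name
  if !(PySem.Str.isIn "eneo" lowered) then false
  else !(["db", "redis", "celery", "worker", "flow"].any (fun part => PySem.Str.isIn part lowered))

-- the condition of A's first for-loop body (any preferred token in lowered, or lowered ends with "eneo-1")
def pvPreferredA (name : String) : Bool :=
  let lowered := PySem.Str.lower name
  (["devcontainer", "backend", "app", "web", "api"].any (fun token => PySem.Str.isIn token lowered))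
    || PySem.Str.endswith lowered "eneo-1"

def preferred_eneo_container_py (names : List String) : Option String :=
  match names.find? pvPreferredA with
  | some n => some n
  | none =>
    match names.find? pv_is_eneo_candidate with
    | some n => some n
    | none => none

-- ===== PORT B =====
def pvAltLoop : List String → Option String → Option String
  | [], fallback => fallback
  | name :: rest, fallback =>
    let lowered := PySem.Str.lower name
    if (["devcontainer", "backend", "app", "web", "api"].any (fun tok => PySem.Str.isIn tok lowered))
        || PySem.Str.endswith lowered "eneo-1" then
      some name
    else
      pvAltLoop rest
        (if fallback.isNone
            && (PySem.Str.isIn "eneo" lowered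
                && !(["db", "redis", "celery", "worker", "flow"].any (fun b => PySem.Str.isIn b lowered)))
         then some name else fallback)

def preferred_eneo_container_py_alt (names : List String) : Option String :=
  pvAltLoop names none

-- ===== PRECONDITION & SPEC =====
def Spec_preferred_eneo_container_py (names : List String) (out : Option String) : Prop := out = preferred_eneo_container_py_alt names
instance (names : List String) (out : Option String) : Decidable (Spec_preferred_eneo_container_py names out) := by unfold Spec_preferred_eneo_container_py; infer_instance

-- ===== CLAIM (what is proved, stated in full; the proofs are below) =====
def Claim_equal_preferred_eneo_container_py : Prop := ∀ (names : List String), Dom_preferred_eneo_container_py names → Spec_preferred_eneo_container_py names (preferred_eneo_container_py names)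

-- ===== LEMMAS AND PROOFS =====

-- B's inline fallback-set condition coincides with A's candidate test
theorem pvCand_eq (name : String) :
    (PySem.Str.isIn "eneo" (PySem.Str.lower name)
       && !(["db", "redis", "celery", "worker", "flow"].any
              (fun b => PySem.Str.isIn b (PySem.Str.lower name))))
      = pv_is_eneo_candidate name := by
  unfold pv_is_eneo_candidate
  cases h : PySem.Str.isIn "eneo" (PySem.Str.lower name) <;>
    simp only [h, Bool.not_true, Bool.not_false, Bool.false_and, Bool.true_and,
      Bool.false_eq_true, if_true, if_false]

theorem pvAltLoop_cons_pos (name : String) (rest : List String) (fb : Option String)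
    (h : pvPreferredA name = true) : pvAltLoop (name :: rest) fb = some name := by
  simp only [pvAltLoop]
  simp only [pvPreferredA] at h
  rw [if_pos h]

theorem pvAltLoop_cons_neg (name : String) (rest : List String) (fb : Option String)
    (h : pvPreferredA name = false) :
    pvAltLoop (name :: rest) fb =
      pvAltLoop rest (if fb.isNone && pv_is_eneo_candidate name then some name else fb) := by
  simp only [pvAltLoop]
  simp only [pvPreferredA] at h
  have h' : ¬ ((["devcontainer", "backend", "app", "web", "api"].any
        (fun tok => PySem.Str.isIn tok (PySem.Str.lower name)))
      || PySem.Str.endswith (PySem.Str.lower name) "eneo-1") = true := by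
    simp only [h]; exact Bool.false_ne_true
  rw [if_neg h', pvCand_eq]

-- characterisation of B's single pass in terms of A's two scans
theorem pvAltLoop_eq (l : List String) : ∀ fb : Option String,
    pvAltLoop l fb =
      match l.find? pvPreferredA with
      | some n => some n
      | none => match fb with
                | some f => some f
                | none => l.find? pv_is_eneo_candidate := by
  induction l with
  | nil => intro fb; cases fb <;> simp [pvAltLoop, List.find?]
  | cons name rest ih =>
    intro fb
    cases hp : pvPreferredA name with
    | true => rw [pvAltLoop_cons_pos _ _ _ hp]; simp [hp]
    | false =>
      rw [pvAltLoop_cons_neg _ _ _ hp, ih]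
      have hfind : (name :: rest).find? pvPreferredA = rest.find? pvPreferredA := by
        simp [hp]
      rw [hfind]
      cases hfa : rest.find? pvPreferredA with
      | some n => cases fb <;> simp
      | none =>
        cases fb with
        | some f => simp
        | none =>
          simp only [Option.isNone_none, Bool.true_and]
          cases hc : pv_is_eneo_candidate name with
          | true => simp [hc]
          | false => simp [hc]

-- ===== VERDICT (by name: the statement is the Claim_ definition above) =====
theorem preferred_eneo_container_py_spec : Claim_equal_preferred_eneo_container_py := by
  intro names _
  unfold Spec_preferred_eneo_container_py preferred_eneo_container_py preferred_eneo_container_py_alt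
  rw [pvAltLoop_eq]
  cases names.find? pvPreferredA with
  | some n => rfl
  | none => cases names.find? pv_is_eneo_candidate <;> rfl
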